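-- pv_equiv track=rewrite | github.com/boss9293-ops/Marketflow | marketflow/backend/scripts/build_validation_snapshot.py | aggregate_data_asof
-- ===== SOURCE A (Python) =====
-- from typing import Any, Dict, List, Optional, Tuple
--
-- def aggregate_data_asof(runs: Dict[str, Dict[str, Any]]) -> Dict[str, Optional[str]]:
--     keys = ["WALCL", "RRP", "EFFR", "VIX", "MARKET_PROXY"]
--     out: Dict[str, Optional[str]] = {k: None for k in keys}
--     for k in keys:
--         vals = []
--         for run in runs.values():
--             v = ((run or {}).get("data_asof") or {}).get(k)
--             if v:
--                 vals.append(str(v))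
--         out[k] = max(vals) if vals else None
--     return out
-- ===== SOURCE B (Python) =====
-- from typing import Any, Dict, Optional
--
--
-- def _improve(cur: Optional[str], v: Any) -> Optional[str]:
--     if v:
--         s = str(v)
--         if cur is None or s > cur:
--             return s
--     return cur
--
--
-- def aggregate_data_asof(runs: Dict[str, Dict[str, Any]]) -> Dict[str, Optional[str]]:
--     keys = ["WALCL", "RRP", "EFFR", "VIX", "MARKET_PROXY"]
--     best: Dict[str, Optional[str]] = {k: None for k in keys}
--     for run in runs.values():
--         r = (run or {}).get("data_asof") or {}
--         for k in keys:
--             best[k] = _improve(best[k], r.get(k))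
--     return best
-- ===== Notes on version B (the rewrite author's own statement) =====
-- stated objective: alternative
-- what changed: B makes a single pass over runs maintaining a running lexicographic maximum per key, instead of A's per-key rescans that collect a list of values and call max on it.
import Mathlib
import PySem

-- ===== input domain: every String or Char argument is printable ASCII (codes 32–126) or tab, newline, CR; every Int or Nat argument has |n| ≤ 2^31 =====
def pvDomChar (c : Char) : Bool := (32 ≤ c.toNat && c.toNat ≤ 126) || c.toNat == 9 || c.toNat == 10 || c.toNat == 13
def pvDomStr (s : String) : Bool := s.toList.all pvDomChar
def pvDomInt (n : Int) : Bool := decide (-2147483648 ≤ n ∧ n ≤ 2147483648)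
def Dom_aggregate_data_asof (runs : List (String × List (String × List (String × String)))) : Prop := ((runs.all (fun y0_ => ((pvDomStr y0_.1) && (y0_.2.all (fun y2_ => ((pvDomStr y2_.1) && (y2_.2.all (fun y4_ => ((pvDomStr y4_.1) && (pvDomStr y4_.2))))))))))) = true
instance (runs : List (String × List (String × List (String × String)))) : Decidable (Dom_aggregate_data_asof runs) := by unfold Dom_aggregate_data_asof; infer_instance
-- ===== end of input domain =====

-- B replaces A's five per-key rescans (collect a list, take max) by one pass over the runs
-- maintaining a running lexicographic maximum per key (objective: alternative, same cost).


-- ===== PORT A =====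
def aggregate_data_asof (runs : List (String × List (String × List (String × String)))) : List (String × Option String) :=
  let keys : List String := ["WALCL", "RRP", "EFFR", "VIX", "MARKET_PROXY"]
  let out : PySem.Dict String (Option String) := PySem.Dict.ofList (keys.map (fun k => (k, none)))
  let out := keys.foldl (fun out k =>
    let vals : List String := (PySem.Dict.ofList runs).values.foldl (fun vals run =>
      let v := (PySem.Dict.ofList (((PySem.Dict.ofList run).get? "data_asof").getD [])).get? k
      match v with
      | some s => if s ≠ "" then vals ++ [s] else vals
      | none => vals) []
    out.insert k (PySem.List.max? vals (fun x => x))) out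
  out.items

-- ===== PORT B =====
-- B-side helper (_improve in Source B)
def pvImprove (cur : Option String) (v : Option String) : Option String :=
  match v with
  | some s =>
      if s ≠ "" then
        match cur with
        | none => some s
        | some c => if c < s then some s else cur
      else cur
  | none => cur

def aggregate_data_asof_alt (runs : List (String × List (String × List (String × String)))) : List (String × Option String) :=
  let keys : List String := ["WALCL", "RRP", "EFFR", "VIX", "MARKET_PROXY"]
  let best : PySem.Dict String (Option String) := PySem.Dict.ofList (keys.map (fun k => (k, none)))
  let best := (PySem.Dict.ofList runs).values.foldl (fun best run =>
    let r := ((PySem.Dict.ofList run).get? "data_asof").getD []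
    keys.foldl (fun best k =>
      best.insert k (pvImprove (best.getD k none) ((PySem.Dict.ofList r).get? k))) best) best
  best.items

-- ===== PRECONDITION & SPEC =====
def Spec_aggregate_data_asof (runs : List (String × List (String × List (String × String)))) (out : List (String × Option String)) : Prop := out = aggregate_data_asof_alt runs
instance (runs : List (String × List (String × List (String × String)))) (out : List (String × Option String)) : Decidable (Spec_aggregate_data_asof runs out) := by unfold Spec_aggregate_data_asof; infer_instance

-- ===== CLAIM (what is proved, stated in full; the proofs are below) =====
def Claim_equal_aggregate_data_asof : Prop := ∀ (runs : List (String × List (String × List (String × String)))), Dom_aggregate_data_asof runs → Spec_aggregate_data_asof runs (aggregate_data_asof runs)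

-- ===== LEMMAS AND PROOFS =====

-- value of key k in run's "data_asof" sub-dict (shared subexpression of both ports)
def pvGetv (run : List (String × List (String × String))) (k : String) : Option String :=
  (PySem.Dict.ofList (((PySem.Dict.ofList run).get? "data_asof").getD [])).get? k

-- the nonempty values for key k across the runs, in order
def pvExt (L : List (List (String × List (String × String)))) (k : String) : List String :=
  L.filterMap (fun run =>
    match pvGetv run k with
    | some s => if s ≠ "" then some s else none
    | none => none)

-- B's running maximum for key k
def pvBF (L : List (List (String × List (String × String)))) (o : Option String) (k : String) : Option String :=
  L.foldl (fun cur run => pvImprove cur (pvGetv run k)) o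

def pvPick (cur : Option String) (s : String) : Option String :=
  match cur with
  | none => some s
  | some c => if c < s then some s else cur

lemma pvCollect_eq (L : List (List (String × List (String × String)))) (k : String) :
    ∀ vs : List String,
      L.foldl (fun vals run =>
        match pvGetv run k with
        | some s => if s ≠ "" then vals ++ [s] else vals
        | none => vals) vs = vs ++ pvExt L k := by
  induction L with
  | nil => intro vs; simp [pvExt]
  | cons run L ih =>
      intro vs
      simp only [List.foldl_cons, pvExt, List.filterMap_cons]
      cases h : pvGetv run k with
      | none => simpa [h, pvExt] using ih vs
      | some s =>
          by_cases hs : s = ""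
          · simpa [h, hs, pvExt] using ih vs
          · simpa [h, hs, pvExt] using ih (vs ++ [s])

lemma pvBF_eq_pick (L : List (List (String × List (String × String)))) (k : String) :
    ∀ o : Option String, pvBF L o k = (pvExt L k).foldl pvPick o := by
  induction L with
  | nil => intro o; simp [pvBF, pvExt]
  | cons run L ih =>
      intro o
      simp only [pvBF, List.foldl_cons, pvExt, List.filterMap_cons]
      cases h : pvGetv run k with
      | none => simpa [pvImprove, h, pvBF, pvExt] using ih o
      | some s =>
          by_cases hs : s = ""
          · simpa [pvImprove, h, hs, pvBF, pvExt] using ih o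
          · simpa [pvImprove, h, hs, pvBF, pvExt, pvPick] using ih (pvPick o s)

lemma pvPick_some (t : List String) : ∀ c : String, t.foldl pvPick (some c) = some (t.foldl max c) := by
  induction t with
  | nil => intro c; rfl
  | cons v t ih =>
      intro c
      have hmax : pvPick (some c) v = some (max c v) := by
        by_cases h : c < v
        · simp [pvPick, h, max_eq_right h.le]
        · simp [pvPick, h, max_eq_left (not_lt.mp h)]
      simp only [List.foldl_cons, hmax, ih]

lemma pvPick_max? (vs : List String) : vs.foldl pvPick none = PySem.List.max? vs (fun x => x) := by
  cases vs with
  | nil => rfl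
  | cons x t =>
      rw [PySem.List.max?_id_cons]
      simpa using pvPick_some t x

-- B's outer fold, evaluated on the fixed-shape five-key dictionary
lemma pvB_fold (L : List (List (String × List (String × String)))) :
    ∀ o1 o2 o3 o4 o5 : Option String,
      L.foldl (fun best run =>
        let r := ((PySem.Dict.ofList run).get? "data_asof").getD []
        (["WALCL", "RRP", "EFFR", "VIX", "MARKET_PROXY"] : List String).foldl (fun best k =>
          best.insert k (pvImprove (best.getD k none) ((PySem.Dict.ofList r).get? k))) best)
        (PySem.Dict.mk [("WALCL", o1), ("RRP", o2), ("EFFR", o3), ("VIX", o4), ("MARKET_PROXY", o5)]) =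
      PySem.Dict.mk [("WALCL", pvBF L o1 "WALCL"), ("RRP", pvBF L o2 "RRP"), ("EFFR", pvBF L o3 "EFFR"),
        ("VIX", pvBF L o4 "VIX"), ("MARKET_PROXY", pvBF L o5 "MARKET_PROXY")] := by
  induction L with
  | nil => intro o1 o2 o3 o4 o5; rfl
  | cons run L ih =>
      intro o1 o2 o3 o4 o5
      rw [List.foldl_cons]
      show L.foldl _ (PySem.Dict.mk [("WALCL", pvImprove o1 (pvGetv run "WALCL")),
        ("RRP", pvImprove o2 (pvGetv run "RRP")), ("EFFR", pvImprove o3 (pvGetv run "EFFR")),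
        ("VIX", pvImprove o4 (pvGetv run "VIX")), ("MARKET_PROXY", pvImprove o5 (pvGetv run "MARKET_PROXY"))]) = _
      rw [ih]
      rfl

-- ===== VERDICT (by name: the statement is the Claim_ definition above) =====
theorem aggregate_data_asof_spec : Claim_equal_aggregate_data_asof := by
  intro runs _
  show aggregate_data_asof runs = aggregate_data_asof_alt runs
  have hB : aggregate_data_asof_alt runs =
      [("WALCL", pvBF (PySem.Dict.ofList runs).values none "WALCL"),
       ("RRP", pvBF (PySem.Dict.ofList runs).values none "RRP"),
       ("EFFR", pvBF (PySem.Dict.ofList runs).values none "EFFR"),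
       ("VIX", pvBF (PySem.Dict.ofList runs).values none "VIX"),
       ("MARKET_PROXY", pvBF (PySem.Dict.ofList runs).values none "MARKET_PROXY")] := by
    show ((PySem.Dict.ofList runs).values.foldl _
      (PySem.Dict.mk [("WALCL", none), ("RRP", none), ("EFFR", none), ("VIX", none), ("MARKET_PROXY", none)])).items = _
    rw [pvB_fold]
  have hA : aggregate_data_asof runs =
      [("WALCL", PySem.List.max? (pvExt (PySem.Dict.ofList runs).values "WALCL") (fun x => x)),
       ("RRP", PySem.List.max? (pvExt (PySem.Dict.ofList runs).values "RRP") (fun x => x)),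
       ("EFFR", PySem.List.max? (pvExt (PySem.Dict.ofList runs).values "EFFR") (fun x => x)),
       ("VIX", PySem.List.max? (pvExt (PySem.Dict.ofList runs).values "VIX") (fun x => x)),
       ("MARKET_PROXY", PySem.List.max? (pvExt (PySem.Dict.ofList runs).values "MARKET_PROXY") (fun x => x))] := by
    show (PySem.Dict.mk [("WALCL", PySem.List.max? ((PySem.Dict.ofList runs).values.foldl (fun vals run =>
        match pvGetv run "WALCL" with
        | some s => if s ≠ "" then vals ++ [s] else vals
        | none => vals) []) (fun x => x)),
      ("RRP", PySem.List.max? ((PySem.Dict.ofList runs).values.foldl (fun vals run =>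
        match pvGetv run "RRP" with
        | some s => if s ≠ "" then vals ++ [s] else vals
        | none => vals) []) (fun x => x)),
      ("EFFR", PySem.List.max? ((PySem.Dict.ofList runs).values.foldl (fun vals run =>
        match pvGetv run "EFFR" with
        | some s => if s ≠ "" then vals ++ [s] else vals
        | none => vals) []) (fun x => x)),
      ("VIX", PySem.List.max? ((PySem.Dict.ofList runs).values.foldl (fun vals run =>
        match pvGetv run "VIX" with
        | some s => if s ≠ "" then vals ++ [s] else vals
        | none => vals) []) (fun x => x)),
      ("MARKET_PROXY", PySem.List.max? ((PySem.Dict.ofList runs).values.foldl (fun vals run =>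
        match pvGetv run "MARKET_PROXY" with
        | some s => if s ≠ "" then vals ++ [s] else vals
        | none => vals) []) (fun x => x))]).items = _
    simp only [pvCollect_eq, List.nil_append]
  rw [hA, hB]
  have key : ∀ k, pvBF (PySem.Dict.ofList runs).values none k =
      PySem.List.max? (pvExt (PySem.Dict.ofList runs).values k) (fun x => x) := by
    intro k; rw [pvBF_eq_pick, pvPick_max?]
  simp only [key]
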